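-- pv_equiv track=rewrite | github.com/4caster-zay/CycloneAid | storm_tracker.py | _derive_intensity_class
-- ===== SOURCE A (Python) =====
-- def _derive_intensity_class(wind_kt):
--     """Derive intensity class from wind speed."""
--     thresholds = [
--         (137, 'C5'), (113, 'C4'), (96, 'C3'), (83, 'C2'),
--         (64, 'C1'), (48, 'STS'), (34, 'TS'), (0, 'TD')
--     ]
--     for threshold, label in thresholds:
--         if wind_kt >= threshold:
--             return label
--     return 'TD'
-- ===== SOURCE B (Python) =====
-- def _derive_intensity_class(wind_kt):
--     """Derive intensity class from wind speed."""
--     bounds = [34, 48, 64, 83, 96, 113, 137]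
--     labels = ['TD', 'TS', 'STS', 'C1', 'C2', 'C3', 'C4', 'C5']
--     lo, hi = 0, len(bounds)
--     while lo < hi:
--         mid = (lo + hi) // 2
--         if wind_kt < bounds[mid]:
--             hi = mid
--         else:
--             lo = mid + 1
--     return labels[lo]
-- ===== Notes on version B (the rewrite author's own statement) =====
-- stated objective: alternative
-- what changed: Replaced the linear descending scan over (threshold,label) pairs with a hand-rolled bisect_right binary search over an ascending bounds table indexing a parallel labels list.
import Mathlib
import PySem

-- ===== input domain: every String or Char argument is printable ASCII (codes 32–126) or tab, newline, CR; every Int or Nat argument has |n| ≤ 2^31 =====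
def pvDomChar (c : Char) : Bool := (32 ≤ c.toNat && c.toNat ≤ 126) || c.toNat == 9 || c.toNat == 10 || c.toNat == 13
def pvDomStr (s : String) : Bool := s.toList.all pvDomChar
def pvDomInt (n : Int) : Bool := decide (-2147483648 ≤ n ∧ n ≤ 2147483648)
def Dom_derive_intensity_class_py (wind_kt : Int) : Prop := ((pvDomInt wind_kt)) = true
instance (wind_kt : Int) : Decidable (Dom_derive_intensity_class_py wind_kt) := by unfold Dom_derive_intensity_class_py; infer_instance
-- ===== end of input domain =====

-- B replaces A's linear descending threshold scan with a binary search over an ascending bounds table (alternative structure, same exact values).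


-- ===== PORT A =====
-- the for-loop with early return over the descending threshold list
def pvLoopA (wind_kt : Int) : List (Int × String) → String
  | [] => "TD"
  | (threshold, label) :: rest =>
      if wind_kt ≥ threshold then label else pvLoopA wind_kt rest

def derive_intensity_class_py (wind_kt : Int) : String :=
  pvLoopA wind_kt
    [(137, "C5"), (113, "C4"), (96, "C3"), (83, "C2"),
     (64, "C1"), (48, "STS"), (34, "TS"), (0, "TD")]

-- ===== PORT B =====
def pvBounds : List Int := [34, 48, 64, 83, 96, 113, 137]
def pvLabels : List String := ["TD", "TS", "STS", "C1", "C2", "C3", "C4", "C5"]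

-- the while-loop of Source B: bisect_right binary search over pvBounds
-- (fuel = pvBounds.length bounds the iteration count; hi - lo shrinks every pass, so it is never exhausted)
def pvBsr (fuel : Nat) (wind_kt : Int) (lo hi : Nat) : Nat :=
  match fuel with
  | 0 => lo
  | fuel + 1 =>
    if lo < hi then
      let mid := (lo + hi) / 2
      if wind_kt < pvBounds.getD mid 0 then pvBsr fuel wind_kt lo mid
      else pvBsr fuel wind_kt (mid + 1) hi
    else lo

def derive_intensity_class_py_alt (wind_kt : Int) : String :=
  pvLabels.getD (pvBsr pvBounds.length wind_kt 0 pvBounds.length) "TD"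

-- ===== PRECONDITION & SPEC =====
def Spec_derive_intensity_class_py (wind_kt : Int) (out : String) : Prop := out = derive_intensity_class_py_alt wind_kt
instance (wind_kt : Int) (out : String) : Decidable (Spec_derive_intensity_class_py wind_kt out) := by unfold Spec_derive_intensity_class_py; infer_instance

-- ===== CLAIM (what is proved, stated in full; the proofs are below) =====
def Claim_equal_derive_intensity_class_py : Prop := ∀ (wind_kt : Int), Dom_derive_intensity_class_py wind_kt → Spec_derive_intensity_class_py wind_kt (derive_intensity_class_py wind_kt)

-- ===== LEMMAS AND PROOFS =====

theorem pvBsr_step (f : Nat) (w : Int) (lo hi : Nat) :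
    pvBsr (f + 1) w lo hi =
      if lo < hi then
        if w < pvBounds.getD ((lo + hi) / 2) 0 then pvBsr f w lo ((lo + hi) / 2)
        else pvBsr f w ((lo + hi) / 2 + 1) hi
      else lo := rfl

theorem pvBsr_base (f : Nat) (w : Int) (lo : Nat) : pvBsr f w lo lo = lo := by
  cases f <;> simp [pvBsr]

-- closed evaluation of the search over the full table
theorem pvBsr_eval (w : Int) : pvBsr 7 w 0 7 =
    if w < 34 then 0 else if w < 48 then 1 else if w < 64 then 2 else
    if w < 83 then 3 else if w < 96 then 4 else if w < 113 then 5 else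
    if w < 137 then 6 else 7 := by
  have e07 : pvBsr 7 w 0 7 = if w < 83 then pvBsr 6 w 0 3 else pvBsr 6 w 4 7 := by
    rw [pvBsr_step]; norm_num [pvBounds]
  have e03 : pvBsr 6 w 0 3 = if w < 48 then pvBsr 5 w 0 1 else pvBsr 5 w 2 3 := by
    rw [pvBsr_step]; norm_num [pvBounds]
  have e01 : pvBsr 5 w 0 1 = if w < 34 then pvBsr 4 w 0 0 else pvBsr 4 w 1 1 := by
    rw [pvBsr_step]; norm_num [pvBounds]
  have e23 : pvBsr 5 w 2 3 = if w < 64 then pvBsr 4 w 2 2 else pvBsr 4 w 3 3 := by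
    rw [pvBsr_step]; norm_num [pvBounds]
  have e47 : pvBsr 6 w 4 7 = if w < 113 then pvBsr 5 w 4 5 else pvBsr 5 w 6 7 := by
    rw [pvBsr_step]; norm_num [pvBounds]
  have e45 : pvBsr 5 w 4 5 = if w < 96 then pvBsr 4 w 4 4 else pvBsr 4 w 5 5 := by
    rw [pvBsr_step]; norm_num [pvBounds]
  have e67 : pvBsr 5 w 6 7 = if w < 137 then pvBsr 4 w 6 6 else pvBsr 4 w 7 7 := by
    rw [pvBsr_step]; norm_num [pvBounds]
  rw [e07, e03, e01, e23, e47, e45, e67,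
    pvBsr_base, pvBsr_base, pvBsr_base, pvBsr_base, pvBsr_base, pvBsr_base,
    pvBsr_base, pvBsr_base]
  split_ifs <;> omega

-- ===== VERDICT (by name: the statement is the Claim_ definition above) =====
theorem derive_intensity_class_py_spec : Claim_equal_derive_intensity_class_py := by
  intro w _
  unfold Spec_derive_intensity_class_py derive_intensity_class_py derive_intensity_class_py_alt
  simp only [pvLoopA]
  rw [show pvBounds.length = 7 from rfl, pvBsr_eval]
  rcases lt_or_ge w 34 with h | h
  · rw [if_neg (by omega), if_neg (by omega), if_neg (by omega), if_neg (by omega), if_neg (by omega), if_neg (by omega), if_neg (by omega), if_pos h]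
    split <;> rfl
  rcases lt_or_ge w 48 with h | h
  · rw [if_neg (by omega), if_neg (by omega), if_neg (by omega), if_neg (by omega), if_neg (by omega), if_neg (by omega), if_pos (by omega), if_neg (by omega), if_pos (by omega)]
    rfl
  rcases lt_or_ge w 64 with h | h
  · rw [if_neg (by omega), if_neg (by omega), if_neg (by omega), if_neg (by omega), if_neg (by omega), if_pos (by omega), if_neg (by omega), if_neg (by omega), if_pos (by omega)]
    rfl
  rcases lt_or_ge w 83 with h | h
  · rw [if_neg (by omega), if_neg (by omega), if_neg (by omega), if_neg (by omega), if_pos (by omega), if_neg (by omega), if_neg (by omega), if_neg (by omega), if_pos (by omega)]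
    rfl
  rcases lt_or_ge w 96 with h | h
  · rw [if_neg (by omega), if_neg (by omega), if_neg (by omega), if_pos (by omega), if_neg (by omega), if_neg (by omega), if_neg (by omega), if_neg (by omega), if_pos (by omega)]
    rfl
  rcases lt_or_ge w 113 with h | h
  · rw [if_neg (by omega), if_neg (by omega), if_pos (by omega), if_neg (by omega), if_neg (by omega), if_neg (by omega), if_neg (by omega), if_neg (by omega), if_pos (by omega)]
    rfl
  rcases lt_or_ge w 137 with h | h
  · rw [if_neg (by omega), if_pos (by omega), if_neg (by omega), if_neg (by omega), if_neg (by omega), if_neg (by omega), if_neg (by omega), if_neg (by omega), if_pos (by omega)]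
    rfl
  · rw [if_pos (by omega), if_neg (by omega), if_neg (by omega), if_neg (by omega), if_neg (by omega), if_neg (by omega), if_neg (by omega), if_neg (by omega)]
    rfl
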